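-- pv_equiv track=rewrite | github.com/JaimeNevado/Docencia-Clases-Particulares | ClasesLuis/Paquete5/Clase7/ej1.py | suma_columna_igual_a_100
-- ===== SOURCE A (Python) =====
-- def suma_columna_igual_a_100(matriz):
-- 	estado = True
-- 	for i in range(len(matriz)):
-- 		suma_columna = 0
-- 		for fila in matriz:
-- 			suma_columna += fila[i]
-- 		if suma_columna != 100:
-- 			estado = False
-- 	return estado
-- ===== SOURCE B (Python) =====
-- def suma_columna_igual_a_100(matriz):
--     col_sums = [0] * len(matriz)
--     for fila in matriz:
--         for i in range(len(matriz)):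
--             col_sums[i] += fila[i]
--     return all(s == 100 for s in col_sums)
-- ===== Notes on version B (the rewrite author's own statement) =====
-- stated objective: alternative
-- what changed: B makes a single row-major pass maintaining a table of running column sums instead of re-scanning the whole matrix once per column, then checks the table at the end.
import Mathlib
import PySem

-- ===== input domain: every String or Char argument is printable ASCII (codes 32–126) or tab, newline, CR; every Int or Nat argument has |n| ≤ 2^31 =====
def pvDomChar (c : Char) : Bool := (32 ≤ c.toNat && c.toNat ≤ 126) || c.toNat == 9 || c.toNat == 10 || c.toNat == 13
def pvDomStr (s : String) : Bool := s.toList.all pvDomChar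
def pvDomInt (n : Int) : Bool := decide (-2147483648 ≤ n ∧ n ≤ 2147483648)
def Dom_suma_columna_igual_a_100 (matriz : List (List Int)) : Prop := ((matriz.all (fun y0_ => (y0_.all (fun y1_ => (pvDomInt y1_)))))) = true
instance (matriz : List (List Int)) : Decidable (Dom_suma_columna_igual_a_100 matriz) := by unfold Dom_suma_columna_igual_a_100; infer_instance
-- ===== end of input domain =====

-- B replaces A's column-by-column rescans by one row-major pass that maintains a table of
-- running column sums, checked once at the end (alternative decomposition, same cost).

-- ===== PORT A =====
-- transliteration of A: for each i in range(len(matriz)), re-scan all rows summing fila[i],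
-- clearing the flag when the column sum differs from 100 (single-use local inlined)
def suma_columna_igual_a_100 (matriz : List (List Int)) : Bool :=
  (List.range matriz.length).foldl
    (fun (estado : Bool) (i : Nat) =>
      if matriz.foldl (fun acc fila => acc + (PySem.List.pyGet? fila (i : Int)).getD 0) 0 ≠ 100
      then false else estado)
    true

-- ===== PORT B =====
-- transliteration of Source B: fold over rows updating the col_sums table in place, then all(s == 100)
def suma_columna_igual_a_100_alt (matriz : List (List Int)) : Bool :=
  (matriz.foldl
    (fun cs fila =>
      (List.range matriz.length).foldl
        (fun cs (i : Nat) => cs.set i (cs.getD i 0 + (PySem.List.pyGet? fila (i : Int)).getD 0))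
        cs)
    (List.replicate matriz.length 0)).all (fun s => s == 100)

-- ===== PRECONDITION & SPEC =====
-- Pre_ excludes exactly the inputs where Python's fila[i] raises IndexError (some row shorter
-- than the number of rows); both A and B raise there.
def Pre_suma_columna_igual_a_100 (matriz : List (List Int)) : Prop :=
  ∀ fila ∈ matriz, matriz.length ≤ fila.length
instance (matriz : List (List Int)) : Decidable (Pre_suma_columna_igual_a_100 matriz) := by
  unfold Pre_suma_columna_igual_a_100; infer_instance

def pvWitness_suma_columna_igual_a_100 : List (List Int) := [[50, 50], [50, 50]]

def Spec_suma_columna_igual_a_100 (matriz : List (List Int)) (out : Bool) : Prop :=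
  out = suma_columna_igual_a_100_alt matriz
instance (matriz : List (List Int)) (out : Bool) :
    Decidable (Spec_suma_columna_igual_a_100 matriz out) := by
  unfold Spec_suma_columna_igual_a_100; infer_instance

-- ===== CLAIM (what is proved, stated in full; the proofs are below) =====
def Claim_equal_suma_columna_igual_a_100 : Prop :=
  ∀ (matriz : List (List Int)), Dom_suma_columna_igual_a_100 matriz →
    Pre_suma_columna_igual_a_100 matriz →
    Spec_suma_columna_igual_a_100 matriz (suma_columna_igual_a_100 matriz)

-- ===== LEMMAS AND PROOFS =====

-- A's flag loop computes the conjunction of the per-column tests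
lemma pv_boolfold (c : Nat → Int) :
    ∀ (l : List Nat) (e : Bool),
      l.foldl (fun est i => if c i ≠ 100 then false else est) e =
        (e && l.all (fun i => c i == 100)) := by
  intro l
  induction l with
  | nil => simp
  | cons x xs ih =>
      intro e
      rw [List.foldl_cons, ih]
      by_cases h : c x = 100
      · simp [h]
      · simp [h]

-- summing with a foldl accumulator equals adding the mapped sum
lemma pv_foldl_add_sum (h : List Int → Int) :
    ∀ (l : List (List Int)) (c : Int), l.foldl (fun a x => a + h x) c = c + (l.map h).sum := by
  intro l
  induction l with
  | nil => simp
  | cons x xs ih => intro c; simp [List.foldl_cons, ih, add_assoc]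

-- B's inner loop preserves the table's length
lemma pv_inner_len (fila : List Int) :
    ∀ (m : Nat) (cs : List Int),
      (List.foldl
        (fun cs (i : Nat) => cs.set i (cs.getD i 0 + (PySem.List.pyGet? fila (i : Int)).getD 0))
        cs (List.range m)).length = cs.length := by
  intro m
  induction m with
  | zero => intro cs; simp
  | succ k ih =>
      intro cs
      rw [List.range_succ, List.foldl_append, List.foldl_cons, List.foldl_nil,
          List.length_set, ih]

-- elementwise value of the table after B's inner loop
lemma pv_inner_getD (fila : List Int) (i : Nat) :
    ∀ (m : Nat) (cs : List Int), i < cs.length →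
      (List.foldl
        (fun cs (i : Nat) => cs.set i (cs.getD i 0 + (PySem.List.pyGet? fila (i : Int)).getD 0))
        cs (List.range m)).getD i 0
        = cs.getD i 0 + (if i < m then (PySem.List.pyGet? fila (i : Int)).getD 0 else 0) := by
  intro m
  induction m with
  | zero => intro cs hi; simp
  | succ k ih =>
      intro cs hi
      rw [List.range_succ, List.foldl_append, List.foldl_cons, List.foldl_nil]
      have hlen := pv_inner_len fila k cs
      rw [List.getD_eq_getElem?_getD, List.getElem?_set]
      by_cases hk : k = i
      · subst hk
        rw [if_pos rfl, if_pos (by omega : k < _)]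
        simp only [Option.getD_some]
        rw [ih cs hi]
        simp
      · rw [if_neg hk, ← List.getD_eq_getElem?_getD, ih cs hi]
        by_cases hik : i < k
        · rw [if_pos hik, if_pos (by omega)]
        · rw [if_neg hik, if_neg (by omega)]

-- B's outer loop preserves the table's length
lemma pv_outer_len (n : Nat) :
    ∀ (rows : List (List Int)) (cs : List Int),
      (List.foldl
        (fun cs fila =>
          (List.range n).foldl
            (fun cs (i : Nat) => cs.set i (cs.getD i 0 + (PySem.List.pyGet? fila (i : Int)).getD 0))
            cs)
        cs rows).length = cs.length := by
  intro rows
  induction rows with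
  | nil => intro cs; simp
  | cons r rs ih => intro cs; rw [List.foldl_cons, ih, pv_inner_len]

-- elementwise value of the table after B's outer loop: running column sums
lemma pv_outer_getD (n : Nat) :
    ∀ (rows : List (List Int)) (cs : List Int), ∀ i, i < cs.length → i < n →
      (List.foldl
        (fun cs fila =>
          (List.range n).foldl
            (fun cs (i : Nat) => cs.set i (cs.getD i 0 + (PySem.List.pyGet? fila (i : Int)).getD 0))
            cs)
        cs rows).getD i 0
        = cs.getD i 0 + (rows.map (fun fila => (PySem.List.pyGet? fila (i : Int)).getD 0)).sum := by
  intro rows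
  induction rows with
  | nil => intro cs i _ _; simp
  | cons r rs ih =>
      intro cs i hi hin
      rw [List.foldl_cons, ih _ i (by rw [pv_inner_len]; exact hi) hin,
          pv_inner_getD r i n cs hi, if_pos hin]
      simp [add_assoc]

-- the final table is exactly the list of column sums
lemma pv_table_eq (matriz : List (List Int)) :
    (List.foldl
      (fun cs fila =>
        (List.range matriz.length).foldl
          (fun cs (i : Nat) => cs.set i (cs.getD i 0 + (PySem.List.pyGet? fila (i : Int)).getD 0))
          cs)
      (List.replicate matriz.length 0) matriz)
    = (List.range matriz.length).map
        (fun (i : Nat) => (matriz.map (fun fila => (PySem.List.pyGet? fila (i : Int)).getD 0)).sum) := by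
  apply List.ext_getElem
  · rw [pv_outer_len]; simp
  · intro i h1 h2
    have hi : i < matriz.length := by
      rw [pv_outer_len] at h1; simpa using h1
    rw [← List.getD_eq_getElem _ 0 h1,
        pv_outer_getD matriz.length matriz (List.replicate matriz.length 0) i (by simpa using hi) hi]
    simp [hi]

-- ===== VERDICT (by name: the statement is the Claim_ definition above) =====
theorem suma_columna_igual_a_100_spec : Claim_equal_suma_columna_igual_a_100 := by
  intro matriz _ _
  unfold Spec_suma_columna_igual_a_100 suma_columna_igual_a_100 suma_columna_igual_a_100_alt
  rw [pv_table_eq, List.all_map, pv_boolfold]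
  rw [Bool.true_and]
  apply List.all_congr rfl
  intro i
  rw [Function.comp_apply, pv_foldl_add_sum]
  simp
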